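-- pv_equiv track=rewrite | github.com/LiDonghuang/logh_sandbox | analysis/engineering_reports/developments/20260308/phase_runtime_collapse_signal_source_evaluation/run_odw_clip_micro_doe.py | first_kill_tick_from_alive
-- ===== SOURCE A (Python) =====
-- def first_kill_tick_from_alive(alive_a, alive_b):
--     n = max(len(alive_a), len(alive_b))
--     if n <= 0:
--         return None
--     base_a = int(alive_a[0]) if alive_a else 0
--     base_b = int(alive_b[0]) if alive_b else 0
--     for idx in range(n):
--         a = int(alive_a[idx]) if idx < len(alive_a) else (int(alive_a[-1]) if alive_a else 0)
--         b = int(alive_b[idx]) if idx < len(alive_b) else (int(alive_b[-1]) if alive_b else 0)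
--         if a < base_a or b < base_b:
--             return idx + 1
--     return None
-- ===== SOURCE B (Python) =====
-- def first_kill_tick_from_alive(alive_a, alive_b):
--     def first_drop(xs):
--         # padding beyond len(xs) repeats the last element, which can never be
--         # the *first* value below the baseline, so scanning xs itself suffices
--         if not xs:
--             return None
--         base = int(xs[0])
--         return next((i for i, v in enumerate(xs) if int(v) < base), None)
--     fa = first_drop(alive_a)
--     fb = first_drop(alive_b)
--     if fa is None and fb is None:
--         return None
--     if fa is None:
--         return fb + 1
--     if fb is None:
--         return fa + 1
--     return min(fa, fb) + 1
-- ===== Notes on version B (the rewrite author's own statement) =====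
-- stated objective: simpler
-- what changed: Replaces the single merged scan over range(max(len_a,len_b)) with last-element padding by two independent first-drop scans of each raw series (padding with the last element can never create the first crossing), combined by taking the minimum index plus one.
import Mathlib
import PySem

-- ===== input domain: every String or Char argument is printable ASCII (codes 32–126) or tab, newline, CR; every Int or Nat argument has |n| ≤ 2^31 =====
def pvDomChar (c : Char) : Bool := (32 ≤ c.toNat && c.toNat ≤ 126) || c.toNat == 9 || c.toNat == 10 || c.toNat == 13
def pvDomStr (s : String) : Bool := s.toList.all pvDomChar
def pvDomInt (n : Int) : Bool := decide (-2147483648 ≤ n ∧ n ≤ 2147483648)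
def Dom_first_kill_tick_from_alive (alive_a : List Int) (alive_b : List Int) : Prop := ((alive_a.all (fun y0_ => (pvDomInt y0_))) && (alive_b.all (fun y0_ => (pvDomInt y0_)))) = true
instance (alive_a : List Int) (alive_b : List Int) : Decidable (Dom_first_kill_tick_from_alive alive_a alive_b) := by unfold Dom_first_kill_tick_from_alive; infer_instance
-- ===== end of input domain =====

-- B replaces A's single merged scan over the padded range(max len) by two
-- independent first-drop scans of the raw series combined by min (simpler).


-- ===== PORT A =====
-- A's for-loop over range(n) with early return, as structural recursion over
-- the list of indices; padded reads exactly as the Python conditionals.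
def pvLoopA (alive_a : List Int) (alive_b : List Int) (base_a : Int) (base_b : Int) : List Nat → Option Int
  | [] => none
  | idx :: rest =>
      let a := if idx < alive_a.length then alive_a.getD idx 0 else alive_a.getLastD 0
      let b := if idx < alive_b.length then alive_b.getD idx 0 else alive_b.getLastD 0
      if a < base_a ∨ b < base_b then some ((idx : Int) + 1)
      else pvLoopA alive_a alive_b base_a base_b rest

def first_kill_tick_from_alive (alive_a : List Int) (alive_b : List Int) : Option Int :=
  let n := max alive_a.length alive_b.length
  if n = 0 then none
  else
    let base_a := alive_a.headD 0
    let base_b := alive_b.headD 0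
    pvLoopA alive_a alive_b base_a base_b (List.range n)

-- ===== PORT B =====
-- B's first_drop helper: enumerate-scan for the first value below the baseline.
def pvFdGo (base : Int) (i : Int) : List Int → Option Int
  | [] => none
  | v :: rest => if v < base then some i else pvFdGo base (i + 1) rest

def pvFirstDrop : List Int → Option Int
  | [] => none
  | x :: rest => pvFdGo x 0 (x :: rest)

def first_kill_tick_from_alive_alt (alive_a : List Int) (alive_b : List Int) : Option Int :=
  match pvFirstDrop alive_a, pvFirstDrop alive_b with
  | none, none => none
  | none, some fb => some (fb + 1)
  | some fa, none => some (fa + 1)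
  | some fa, some fb => some (min fa fb + 1)

-- ===== PRECONDITION & SPEC =====
def Spec_first_kill_tick_from_alive (alive_a : List Int) (alive_b : List Int) (out : Option Int) : Prop := out = first_kill_tick_from_alive_alt alive_a alive_b
instance (alive_a : List Int) (alive_b : List Int) (out : Option Int) : Decidable (Spec_first_kill_tick_from_alive alive_a alive_b out) := by unfold Spec_first_kill_tick_from_alive; infer_instance

-- ===== CLAIM (what is proved, stated in full; the proofs are below) =====
def Claim_equal_first_kill_tick_from_alive : Prop := ∀ (alive_a : List Int) (alive_b : List Int), Dom_first_kill_tick_from_alive alive_a alive_b → Spec_first_kill_tick_from_alive alive_a alive_b (first_kill_tick_from_alive alive_a alive_b)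

-- ===== LEMMAS AND PROOFS =====

-- A's padded predicate at index i, for one series
def pvCond (xs : List Int) (i : Nat) : Bool :=
  decide ((if i < xs.length then xs.getD i 0 else xs.getLastD 0) < xs.headD 0)

theorem pvLoopA_eq_find? (a b : List Int) (ba bb : Int) (l : List Nat) :
    pvLoopA a b ba bb l =
      (l.find? (fun i =>
        decide ((if i < a.length then a.getD i 0 else a.getLastD 0) < ba) ||
        decide ((if i < b.length then b.getD i 0 else b.getLastD 0) < bb))).map
        (fun i => (i : Int) + 1) := by
  induction l with
  | nil => simp [pvLoopA]
  | cons x rest ih =>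
      simp only [pvLoopA, List.find?]
      by_cases ha : ((if x < a.length then a.getD x 0 else a.getLastD 0) < ba) <;>
        by_cases hb : ((if x < b.length then b.getD x 0 else b.getLastD 0) < bb) <;>
        simp only [List.getD_eq_getElem?_getD, List.getLastD_eq_getLast?] at ha hb <;>
        simp [ha, hb, ih]

theorem pvFind?_or (p q : Nat → Bool) (l : List Nat) (hl : l.Pairwise (· ≤ ·)) :
    l.find? (fun i => p i || q i) =
      match l.find? p, l.find? q with
      | none, none => none
      | none, some j => some j
      | some i, none => some i
      | some i, some j => some (min i j) := by
  induction l with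
  | nil => simp
  | cons x rest ih =>
      have hx : ∀ y ∈ rest, x ≤ y := fun y hy => (List.pairwise_cons.mp hl).1 y hy
      have htl := ih (List.pairwise_cons.mp hl).2
      by_cases hp : p x = true <;> by_cases hq : q x = true <;>
        simp only [List.find?_cons, hp, hq, Bool.or_true,
          Bool.or_false, htl]
      · simp
      · rcases hfq : rest.find? q with _ | j
        · simp
        · have hj : x ≤ j := hx j (List.mem_of_find?_eq_some hfq)
          simp [Nat.min_eq_left hj]
      · rcases hfp : rest.find? p with _ | i
        · simp
        · have hi : x ≤ i := hx i (List.mem_of_find?_eq_some hfp)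
          simp [Nat.min_eq_right hi]

-- the scan of B equals find? over range of the unpadded predicate (with offset)
theorem pvFdGo_eq (base : Int) (xs : List Int) : ∀ (k : Int),
    pvFdGo base k xs =
      ((List.range xs.length).find? (fun i => decide (xs.getD i 0 < base))).map
        (fun i => (i : Int) + k) := by
  induction xs with
  | nil => intro k; simp [pvFdGo]
  | cons v rest ih =>
      intro k
      by_cases hv : v < base
      · simp [pvFdGo, hv, List.range_succ_eq_map]
      · have hd : (decide (v < base)) = false := by simp [hv]
        have hpred : ((fun i => decide ((v :: rest).getD i 0 < base)) ∘ Nat.succ)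
            = (fun i => decide (rest.getD i 0 < base)) := by
          funext i; simp
        simp only [pvFdGo, if_neg hv, ih (k + 1), List.length_cons,
          List.range_succ_eq_map, List.find?_cons, List.find?_map, hpred]
        rcases h' : (List.range rest.length).find?
            (fun i => decide (rest.getD i 0 < base)) with _ | j
        · simp [hd, h']
        · simp [hd, h']
          ring

theorem pvFind?_congr (p q : Nat → Bool) (l : List Nat) (h : ∀ a ∈ l, p a = q a) :
    l.find? p = l.find? q := by
  induction l with
  | nil => simp
  | cons x rest ih =>
      simp only [List.find?_cons, h x List.mem_cons_self]
      rcases hq : q x with _ | _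
      · exact ih fun a ha => h a (List.mem_cons_of_mem _ ha)
      · rfl

-- extending the range past xs.length adds no first crossing
theorem pvFind?_extend (xs : List Int) (n : Nat) (h : xs.length ≤ n) :
    (List.range n).find? (pvCond xs) =
      (List.range xs.length).find? (fun i => decide (xs.getD i 0 < xs.headD 0)) := by
  obtain ⟨m, rfl⟩ : ∃ m, n = xs.length + m := ⟨n - xs.length, by omega⟩
  rw [List.range_add, List.find?_append]
  have hhead : (List.range xs.length).find? (pvCond xs) =
      (List.range xs.length).find? (fun i => decide (xs.getD i 0 < xs.headD 0)) := by
    refine pvFind?_congr _ _ _ fun i hi => ?_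
    have : i < xs.length := List.mem_range.mp hi
    simp [pvCond, this]
  rw [hhead]
  rcases hf : (List.range xs.length).find?
      (fun i => decide (xs.getD i 0 < xs.headD 0)) with _ | i
  · have htail : ((List.range m).map (xs.length + ·)).find? (pvCond xs) = none := by
      refine List.find?_eq_none.mpr fun j hj => ?_
      obtain ⟨j', _, rfl⟩ := List.mem_map.mp hj
      have hge : ¬ (xs.length + j' < xs.length) := by omega
      rcases hxs : xs with _ | ⟨x, rest⟩
      · simp [pvCond]
      · have hlen : 0 < xs.length := by rw [hxs]; simp
        have hlast : ¬ (xs.getD (xs.length - 1) 0 < xs.headD 0) := by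
          have := List.find?_eq_none.mp hf (xs.length - 1)
            (List.mem_range.mpr (by omega))
          simpa using this
        have hgl : xs.getLastD 0 = xs.getD (xs.length - 1) 0 := by
          rw [List.getLastD_eq_getLast?, List.getLast?_eq_getElem? ,
            List.getD_eq_getElem?_getD]
        rw [← hxs]
        simp only [pvCond, if_neg hge, hgl]
        simpa using hlast
    rw [htail]
    rfl
  · rfl

theorem pvFirstDrop_eq (xs : List Int) :
    pvFirstDrop xs =
      ((List.range xs.length).find? (fun i => decide (xs.getD i 0 < xs.headD 0))).map
        (fun i => (i : Int)) := by
  rcases xs with _ | ⟨x, rest⟩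
  · simp [pvFirstDrop]
  · rw [pvFirstDrop, pvFdGo_eq]
    simp

-- ===== VERDICT (by name: the statement is the Claim_ definition above) =====
theorem first_kill_tick_from_alive_spec : Claim_equal_first_kill_tick_from_alive := by
  intro a b _
  unfold Spec_first_kill_tick_from_alive
  by_cases hn : max a.length b.length = 0
  · have ha : a = [] := List.length_eq_zero_iff.mp (by omega)
    have hb : b = [] := List.length_eq_zero_iff.mp (by omega)
    subst ha; subst hb
    simp [first_kill_tick_from_alive, first_kill_tick_from_alive_alt, pvFirstDrop]
  · have hcond : (fun i =>
        decide ((if i < a.length then a.getD i 0 else a.getLastD 0) < a.headD 0) ||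
        decide ((if i < b.length then b.getD i 0 else b.getLastD 0) < b.headD 0))
        = fun i => pvCond a i || pvCond b i := rfl
    rw [show first_kill_tick_from_alive a b =
        pvLoopA a b (a.headD 0) (b.headD 0) (List.range (max a.length b.length))
      from by simp [first_kill_tick_from_alive, hn]]
    rw [pvLoopA_eq_find?, hcond,
      pvFind?_or _ _ _ (List.pairwise_lt_range.imp le_of_lt),
      pvFind?_extend a _ (le_max_left _ _), pvFind?_extend b _ (le_max_right _ _)]
    rw [first_kill_tick_from_alive_alt, pvFirstDrop_eq a, pvFirstDrop_eq b]
    rcases hfa : (List.range a.length).find?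
        (fun i => decide (a.getD i 0 < a.headD 0)) with _ | i <;>
      rcases hfb : (List.range b.length).find?
        (fun i => decide (b.getD i 0 < b.headD 0)) with _ | j <;>
      simp [Nat.cast_min]
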